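-- pv_equiv track=rewrite | github.com/AHCChan/Table_Tools | _Command_Line_Parser.py | Validate_Ints_NonNeg
-- ===== SOURCE A (Python) =====
-- def Validate_Ints_NonNeg(strings):
--     """
--     Validates and returns the non-negative integers specified.
--     Return an empty list if the input is invalid.
--
--     @strings
--         (list<str>)
--         A list of strings denoting non-negative integers.
--
--     Validate_Ints_NonNeg(list<str>) -> list<int>
--     """
--     result = []
--     for string in strings:
--         try:
--             n = int(string)
--             result.append(n)
--             if n < 0: return []
--         except:
--             return []
--     return result
-- ===== SOURCE B (Python) =====
-- def Validate_Ints_NonNeg(strings):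
--     # Option-style fold over the REVERSED list: the accumulator is the result
--     # built back-to-front by prepending, or None once any string fails to
--     # parse or is negative; no early returns — the loop always runs to the end
--     # and None absorbs everything after a failure. Order does not matter
--     # because every failure mode collapses to [].
--     acc = []
--     for s in reversed(strings):
--         if acc is None:
--             continue
--         try:
--             n = int(s)
--         except Exception:
--             acc = None
--             continue
--         acc = None if n < 0 else [n] + acc
--     return [] if acc is None else acc
-- ===== Notes on version B (the rewrite author's own statement) =====
-- stated objective: alternative
-- what changed: Replaces the forward loop with try/except early returns by a total Option-accumulator fold over the reversed list that builds the result back-to-front by prepending, with a None accumulator absorbing failures instead of early exits.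
import Mathlib
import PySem

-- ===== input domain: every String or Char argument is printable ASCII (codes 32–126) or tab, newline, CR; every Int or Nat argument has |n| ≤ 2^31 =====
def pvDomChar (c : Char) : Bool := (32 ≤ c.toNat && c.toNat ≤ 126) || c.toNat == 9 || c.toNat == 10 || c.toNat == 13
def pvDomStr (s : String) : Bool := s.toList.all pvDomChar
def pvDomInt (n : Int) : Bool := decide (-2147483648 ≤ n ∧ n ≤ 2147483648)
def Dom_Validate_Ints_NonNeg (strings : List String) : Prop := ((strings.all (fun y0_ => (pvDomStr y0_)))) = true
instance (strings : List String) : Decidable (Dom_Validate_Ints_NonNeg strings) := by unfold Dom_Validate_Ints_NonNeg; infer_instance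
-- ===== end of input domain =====

-- B (alternative): total Option-accumulator fold over the reversed list, building the result by prepending; None absorbs failures instead of A's early returns.


-- ===== PORT A =====
-- A's loop: parse each string; on parse failure return [], append n, on n < 0 return []
def pvGoA : List String → List Int → List Int
  | [], result => result
  | s :: rest, result =>
    match PySem.Int.ofStr? s with
    | none => []
    | some n => if n < 0 then [] else pvGoA rest (result ++ [n])

def Validate_Ints_NonNeg (strings : List String) : List Int :=
  pvGoA strings []

-- ===== PORT B =====
-- one iteration of B's loop body: None absorbs, parse failure or negative sets None, else prepend
def pvStepB (acc : Option (List Int)) (s : String) : Option (List Int) :=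
  match acc with
  | none => none
  | some r =>
    match PySem.Int.ofStr? s with
    | none => none
    | some n => if n < 0 then none else some (n :: r)

def Validate_Ints_NonNeg_alt (strings : List String) : List Int :=
  match strings.reverse.foldl pvStepB (some []) with
  | none => []
  | some r => r

-- ===== PRECONDITION & SPEC =====
def Spec_Validate_Ints_NonNeg (strings : List String) (out : List Int) : Prop := out = Validate_Ints_NonNeg_alt strings
instance (strings : List String) (out : List Int) : Decidable (Spec_Validate_Ints_NonNeg strings out) := by unfold Spec_Validate_Ints_NonNeg; infer_instance

-- ===== CLAIM (what is proved, stated in full; the proofs are below) =====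
def Claim_equal_Validate_Ints_NonNeg : Prop := ∀ (strings : List String), Dom_Validate_Ints_NonNeg strings → Spec_Validate_Ints_NonNeg strings (Validate_Ints_NonNeg strings)

-- ===== LEMMAS AND PROOFS =====

-- common characterisation: parse everything, then reject any negative
def pvChar (strings : List String) : Option (List Int) :=
  match strings.mapM PySem.Int.ofStr? with
  | none => none
  | some ns => if ns.any (fun n => n < 0) then none else some ns

theorem pvGoA_eq (ss : List String) : ∀ (acc : List Int),
    pvGoA ss acc = (match pvChar ss with | none => [] | some ns => acc ++ ns) := by
  induction ss with
  | nil => intro acc; simp [pvGoA, pvChar]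
  | cons s rest ih =>
    intro acc
    simp only [pvGoA, pvChar, List.mapM_cons]
    cases h : PySem.Int.ofStr? s with
    | none => simp
    | some n =>
      cases hr : rest.mapM PySem.Int.ofStr? with
      | none =>
        by_cases hn : n < 0
        · simp [hn]
        · simp [hn, ih, pvChar, hr]
      | some ns =>
        by_cases hn : n < 0
        · simp [hn, List.any_cons]
        · simp only [ih, pvChar, hr, hn, if_false]
          by_cases h2 : ns.any (fun n => decide (n < 0)) = true
          · simp [h2, hn]
          · simp [h2, hn, List.append_assoc]

theorem pvFoldB_eq (ss : List String) :
    ss.reverse.foldl pvStepB (some []) = pvChar ss := by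
  rw [List.foldl_reverse]
  induction ss with
  | nil => simp [pvChar]
  | cons s rest ih =>
    simp only [List.foldr_cons, ih, pvChar, List.mapM_cons]
    cases h : PySem.Int.ofStr? s with
    | none =>
      cases hr : rest.mapM PySem.Int.ofStr? with
      | none => simp [pvStepB]
      | some ns =>
        by_cases h2 : ns.any (fun n => decide (n < 0)) = true
        · simp [pvStepB, h2]
        · simp [pvStepB, h, h2]
    | some n =>
      cases hr : rest.mapM PySem.Int.ofStr? with
      | none => simp [pvStepB]
      | some ns =>
        by_cases h2 : ns.any (fun n => decide (n < 0)) = true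
        · simp [pvStepB, h2]
        · by_cases hn : n < 0
          · simp [pvStepB, h, h2, hn]
          · simp [pvStepB, h, h2, hn]

-- ===== VERDICT (by name: the statement is the Claim_ definition above) =====
theorem Validate_Ints_NonNeg_spec : Claim_equal_Validate_Ints_NonNeg := by
  intro strings _
  unfold Spec_Validate_Ints_NonNeg Validate_Ints_NonNeg Validate_Ints_NonNeg_alt
  rw [pvGoA_eq, pvFoldB_eq]
  cases pvChar strings <;> simp
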